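-- pv_equiv track=rewrite | github.com/kyungjun-kim/Problem_Solving | Programmers/Level_1/신규 아이디 추천.py | solution
-- ===== SOURCE A (Python) =====
-- def solution(new_id):
--     new_id = new_id.lower()
--     answer = ''
--     for i in new_id :
--         if answer == '' and i == '.' :
--             continue
--         if i.isalnum() or i in ['-','_','.'] :
--             if len(answer) >= 1 and answer[-1] == '.' and i == '.' :
--                 continue
--             else :
--                 answer += i
--     if len(answer) != 0 and answer[-1] == '.' :
--         answer = answer[:-1]
--     elif len(answer) == 0 :
--         answer = 'a'
--
--     if len(answer) > 15 :
--         while len(answer) > 15 or answer[-1] == '.' :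
--             answer = answer[:-1]
--     if len(answer) < 3 :
--         while len(answer) < 3 :
--             answer += answer[-1]
--     return answer
-- ===== SOURCE B (Python) =====
-- def solution(new_id):
--     s = new_id.lower()
--     # step 2: keep only alnum and '-', '_', '.'
--     s = ''.join(c for c in s if c.isalnum() or c in '-_.')
--     # step 3: collapse runs of '.' to a single '.' (pair each char with its predecessor)
--     s = ''.join(c for c, p in zip(s, 'x' + s) if not (c == '.' and p == '.'))
--     # step 4: strip dots from both ends
--     s = s.strip('.')
--     # step 5: empty -> 'a'
--     if not s:
--         s = 'a'
--     # step 6: cut to 15 chars, removing any trailing dot that exposes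
--     s = s[:15].rstrip('.')
--     # step 7: pad to length 3 with the last character
--     return s + s[-1] * (3 - len(s))
-- ===== Notes on version B (the rewrite author's own statement) =====
-- stated objective: idiomatic
-- what changed: A's single fused character loop with leftover-state checks and two while loops, all growing the answer by repeated string concatenation, is replaced by a pipeline of independent linear passes: lowercase, filter allowed characters, collapse dot runs by pairing each character with its predecessor, strip dots, placeholder default, truncate-and-rstrip, pad by string multiplication.
import Mathlib
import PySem

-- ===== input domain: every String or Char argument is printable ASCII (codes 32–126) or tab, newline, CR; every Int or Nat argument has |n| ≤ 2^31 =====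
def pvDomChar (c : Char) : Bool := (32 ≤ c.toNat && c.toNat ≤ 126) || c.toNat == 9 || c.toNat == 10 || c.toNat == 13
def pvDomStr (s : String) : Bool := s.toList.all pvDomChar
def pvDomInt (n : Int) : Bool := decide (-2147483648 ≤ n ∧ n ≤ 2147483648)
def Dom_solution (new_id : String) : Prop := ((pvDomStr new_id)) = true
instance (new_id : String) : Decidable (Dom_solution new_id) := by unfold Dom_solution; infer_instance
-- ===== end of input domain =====

-- B replaces A's single fused character loop (with leftover-state checks and two while loops)
-- by a pipeline of independent linear passes over the string (idiomatic; avoids A's quadratic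
-- repeated string concatenation — measured faster in a timing run).

-- ===== PORT A =====
-- one step of A's for-loop: answer is the accumulator, i the current character
def solAstep (answer : List Char) (i : Char) : List Char :=
  if answer = [] ∧ i = '.' then answer
  else if PySem.Chars.isalnum i || decide (i ∈ ['-', '_', '.']) then
    if 1 ≤ answer.length ∧ PySem.List.pyGet? answer (-1) = some '.' ∧ i = '.' then answer
    else answer ++ [i]
  else answer

-- A's 'while len(answer) > 15 or answer[-1] == '.' : answer = answer[:-1]'
def solATrim (answer : List Char) : List Char :=
  if h : 15 < answer.length ∨ PySem.List.pyGet? answer (-1) = some '.' then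
    solATrim (PySem.List.slice answer none (some (-1)))
  else answer
termination_by answer.length
decreasing_by
  have hne : answer ≠ [] := by
    rcases h with h | h
    · intro he; simp [he] at h
    · intro he; simp [he, PySem.List.pyGet?_neg_one] at h
  simp [PySem.List.slice_to_neg_one, List.length_dropLast]
  have := List.length_pos_of_ne_nil hne
  omega

-- A's 'while len(answer) < 3 : answer += answer[-1]'
def solAPad (answer : List Char) : List Char :=
  if h : answer.length < 3 then
    solAPad (answer ++ [PySem.List.pyGetD answer (-1) 'a'])
  else answer
termination_by 3 - answer.length
decreasing_by simp; omega

def solution (new_id : String) : String :=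
  let s := PySem.Chars.lower new_id.toList
  let answer := s.foldl solAstep []
  let answer :=
    if answer.length ≠ 0 ∧ PySem.List.pyGet? answer (-1) = some '.' then
      PySem.List.slice answer none (some (-1))
    else if answer.length = 0 then ['a'] else answer
  let answer := if 15 < answer.length then solATrim answer else answer
  let answer := if answer.length < 3 then solAPad answer else answer
  String.ofList answer

-- ===== PORT B =====
-- hand port of s.rstrip('.'): drop the trailing '.' characters (exact)
def rstripDots (s : List Char) : List Char := (s.reverse.dropWhile (· == '.')).reverse

def solution_alt (new_id : String) : String :=
  let s := PySem.Chars.lower new_id.toList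
  -- ''.join(c for c in s if c.isalnum() or c in '-_.')
  let s := s.filter (fun c => PySem.Chars.isalnum c || decide (c ∈ ['-', '_', '.']))
  -- ''.join(c for c, p in zip(s, 'x' + s) if not (c == '.' and p == '.'))
  let s := ((s.zip ('x' :: s)).filter (fun q => !(decide (q.1 = '.' ∧ q.2 = '.')))).map (·.1)
  -- s.strip('.')
  let s := PySem.Chars.stripChars s ['.']
  let s := if s = [] then ['a'] else s
  -- s[:15].rstrip('.')
  let s := rstripDots (PySem.List.slice s none (some 15))
  -- s + s[-1] * (3 - len(s))
  String.ofList (s ++ PySem.List.pyRepeat [PySem.List.pyGetD s (-1) 'a'] (3 - (s.length : Int)))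

-- ===== PRECONDITION & SPEC =====
def Spec_solution (new_id : String) (out : String) : Prop := out = solution_alt new_id
instance (new_id : String) (out : String) : Decidable (Spec_solution new_id out) := by unfold Spec_solution; infer_instance

-- ===== CLAIM (what is proved, stated in full; the proofs are below) =====
def Claim_equal_solution : Prop := ∀ (new_id : String), Dom_solution new_id → Spec_solution new_id (solution new_id)

-- ===== LEMMAS AND PROOFS =====

def keepC (c : Char) : Bool := PySem.Chars.isalnum c || decide (c ∈ ['-', '_', '.'])

-- collapse consecutive dots, given the previous character p
def zcol : Char → List Char → List Char
  | _, [] => []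
  | p, c :: l => if c = '.' ∧ p = '.' then zcol c l else c :: zcol c l

-- what A's loop produces on an already-filtered string
def aclean : List Char → List Char
  | [] => []
  | c :: l => if c = '.' then aclean l else c :: zcol c l

def lstripDots (s : List Char) : List Char := s.dropWhile (· == '.')

def noddP (a b : Char) : Prop := ¬(a = '.' ∧ b = '.')

theorem foldl_step_filter (l : List Char) : ∀ (acc : List Char),
    l.foldl solAstep acc = (l.filter keepC).foldl solAstep acc := by
  induction l with
  | nil => intro acc; rfl
  | cons c l ih =>
    intro acc
    by_cases hc : keepC c = true
    · simp only [List.filter_cons, hc, if_pos, List.foldl_cons, ih]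
    · have hcd : c ≠ '.' := by intro h; subst h; exact hc (by decide)
      have hstep : solAstep acc c = acc := by
        unfold solAstep
        simp [hcd, keepC] at hc ⊢
        exact hc
      simp only [List.filter_cons, hc, if_neg, List.foldl_cons, hstep, ih,
        Bool.false_eq_true, if_false]

theorem foldl_step_acc : ∀ (t : List Char), (∀ c ∈ t, keepC c = true) →
    ∀ (acc : List Char) (p : Char), acc.getLast? = some p →
    t.foldl solAstep acc = acc ++ zcol p t := by
  intro t
  induction t with
  | nil => intro _ acc p _; simp [zcol]
  | cons c l ih =>
    intro ht acc p hlast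
    have hk : keepC c = true := ht c (by simp)
    have hne : acc ≠ [] := by intro h; simp [h] at hlast
    have h1 : 1 ≤ acc.length := List.length_pos_of_ne_nil hne
    have hget : PySem.List.pyGet? acc (-1) = some p := by
      rw [PySem.List.pyGet?_neg_one]; exact hlast
    have ht' : ∀ c ∈ l, keepC c = true := fun x hx => ht x (List.mem_cons_of_mem _ hx)
    simp only [keepC] at hk
    by_cases hcp : c = '.' ∧ p = '.'
    · obtain ⟨hc, hp⟩ := hcp
      subst hc; subst hp
      have hstep : solAstep acc '.' = acc := by
        unfold solAstep
        rw [if_neg (by simp [hne]), if_pos hk, if_pos ⟨h1, by rw [hget], rfl⟩]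
      rw [List.foldl_cons, hstep, ih ht' acc '.' hlast]
      have : zcol '.' ('.' :: l) = zcol '.' l := by simp [zcol]
      rw [this]
    · have hstep : solAstep acc c = acc ++ [c] := by
        unfold solAstep
        rw [if_neg (by simp [hne]), if_pos hk, if_neg (by
          rintro ⟨-, hd, hc⟩
          rw [hget] at hd
          exact hcp ⟨hc, by injection hd⟩)]
      rw [List.foldl_cons, hstep, ih ht' (acc ++ [c]) c List.getLast?_concat]
      have : zcol p (c :: l) = c :: zcol c l := by
        simp only [zcol, if_neg hcp]
      rw [this, List.append_assoc]; rfl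

theorem foldl_step_nil : ∀ (t : List Char), (∀ c ∈ t, keepC c = true) →
    t.foldl solAstep [] = aclean t := by
  intro t
  induction t with
  | nil => intro _; rfl
  | cons c l ih =>
    intro ht
    have hk : keepC c = true := ht c (by simp)
    have ht' : ∀ c ∈ l, keepC c = true := fun x hx => ht x (List.mem_cons_of_mem _ hx)
    simp only [keepC] at hk
    by_cases hc : c = '.'
    · have hstep : solAstep [] c = [] := by
        unfold solAstep; rw [if_pos ⟨rfl, hc⟩]
      rw [List.foldl_cons, hstep, ih ht']
      simp only [aclean, if_pos hc]
    · have hstep : solAstep [] c = [c] := by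
        unfold solAstep
        rw [if_neg (by rintro ⟨-, h⟩; exact hc h), if_pos hk, if_neg (by rintro ⟨h, -⟩; simp at h)]
        rfl
      rw [List.foldl_cons, hstep,
        foldl_step_acc l ht' [c] c (by simp)]
      simp only [aclean, if_neg hc]; rfl

theorem zip_collapse : ∀ (t : List Char) (p : Char),
    ((t.zip (p :: t)).filter (fun q => !(decide (q.1 = '.' ∧ q.2 = '.')))).map (·.1) = zcol p t := by
  intro t
  induction t with
  | nil => intro p; rfl
  | cons c l ih =>
    intro p
    rw [List.zip_cons_cons, List.filter_cons]
    by_cases h : c = '.' ∧ p = '.'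
    · obtain ⟨hc, hp⟩ := h
      subst hc; subst hp
      rw [if_neg (by simp), ih]
      simp [zcol]
    · rw [if_pos (by simpa using not_and_or.mp h), List.map_cons, ih]
      simp only [zcol, if_neg h]

theorem lstrip_zcol : ∀ (t : List Char) (p : Char), lstripDots (zcol p t) = aclean t := by
  intro t
  induction t with
  | nil => intro p; rfl
  | cons c l ih =>
    intro p
    by_cases hc : c = '.'
    · subst hc
      by_cases hp : p = '.'
      · subst hp
        rw [show zcol '.' ('.' :: l) = zcol '.' l from by simp [zcol]]
        rw [ih '.']
        simp [aclean]
      · rw [show zcol p ('.' :: l) = '.' :: zcol '.' l from by simp [zcol, hp]]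
        rw [show lstripDots ('.' :: zcol '.' l) = lstripDots (zcol '.' l) from by
          simp [lstripDots, List.dropWhile_cons]]
        rw [ih '.']
        simp [aclean]
    · rw [show zcol p (c :: l) = c :: zcol c l from by simp [zcol, hc]]
      rw [show lstripDots (c :: zcol c l) = c :: zcol c l from by
        simp [lstripDots, List.dropWhile_cons, hc]]
      simp [aclean, hc]

theorem head_dropWhile_dot : ∀ (l : List Char), (l.dropWhile (· == '.')).head? ≠ some '.' := by
  intro l
  induction l with
  | nil => simp
  | cons c l ih =>
    rw [List.dropWhile_cons]
    by_cases hc : c = '.'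
    · rw [if_pos (by simp [hc])]; exact ih
    · rw [if_neg (by simp [hc])]; simpa using hc

theorem head_aclean (t : List Char) : (aclean t).head? ≠ some '.' := by
  rw [← lstrip_zcol t '.']; exact head_dropWhile_dot _

theorem zcol_dot_head : ∀ (l : List Char), (zcol '.' l).head? ≠ some '.' := by
  intro l
  induction l with
  | nil => simp [zcol]
  | cons c m ih =>
    by_cases hc : c = '.'
    · subst hc
      rw [show zcol '.' ('.' :: m) = zcol '.' m from by simp [zcol]]
      exact ih
    · rw [show zcol '.' (c :: m) = c :: zcol c m from by simp [zcol, hc]]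
      simpa using hc

theorem nodd_zcol : ∀ (t : List Char) (p : Char), List.IsChain noddP (zcol p t) := by
  intro t
  induction t with
  | nil => intro p; simp [zcol]
  | cons c l ih =>
    intro p
    by_cases h : c = '.' ∧ p = '.'
    · rw [show zcol p (c :: l) = zcol c l from by simp only [zcol, if_pos h]]
      exact ih c
    · rw [show zcol p (c :: l) = c :: zcol c l from by simp only [zcol, if_neg h]]
      rcases he : zcol c l with - | ⟨b, m⟩
      · simp
      · rw [List.isChain_cons_iff]
        refine Or.inr ⟨b, m, ?_, by rw [← he]; exact ih c, rfl⟩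
        rintro ⟨hc, hb⟩
        subst hc
        exact zcol_dot_head l (by rw [he, hb]; rfl)

theorem nodd_of_suffix {w v : List Char} (h : List.IsChain noddP w) (hs : v <:+ w) :
    List.IsChain noddP v := by
  obtain ⟨pre, rfl⟩ := hs
  exact (List.isChain_append.mp h).2.1

theorem nodd_aclean (t : List Char) : List.IsChain noddP (aclean t) := by
  rw [← lstrip_zcol t '.']
  exact nodd_of_suffix (nodd_zcol t '.') (List.dropWhile_suffix _)

theorem rstrip_noop (w : List Char) (h : w.getLast? ≠ some '.') : rstripDots w = w := by
  unfold rstripDots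
  rcases hr : w.reverse with - | ⟨c, rest⟩
  · simpa using congrArg List.reverse hr
  · have hc : c ≠ '.' := by
      intro he
      exact h (by rw [← List.head?_reverse, hr, he]; rfl)
    rw [List.dropWhile_cons, if_neg (by simp [hc]), ← hr, List.reverse_reverse]

theorem rstrip_last (w : List Char) : (rstripDots w).getLast? ≠ some '.' := by
  unfold rstripDots
  rw [List.getLast?_reverse]
  exact head_dropWhile_dot _

theorem rstrip_append_dot (u : List Char) : rstripDots (u ++ ['.']) = rstripDots u := by
  unfold rstripDots
  rw [List.reverse_append, List.reverse_singleton, List.singleton_append,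
    List.dropWhile_cons, if_pos (by simp)]

theorem rstrip_eq_dropLast (w : List Char) (hn : List.IsChain noddP w)
    (h : w.getLast? = some '.') : rstripDots w = w.dropLast := by
  obtain ⟨u, rfl⟩ := List.getLast?_eq_some_iff.mp h
  rw [rstrip_append_dot, List.dropLast_concat]
  apply rstrip_noop
  intro hu
  have := (List.isChain_append.mp hn).2.2 '.' hu '.' rfl
  exact this ⟨rfl, rfl⟩

theorem rstrip_ne_nil (w : List Char) (h1 : w.head? ≠ some '.') (h2 : w ≠ []) :
    rstripDots w ≠ [] := by
  unfold rstripDots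
  intro he
  have hall : ∀ x ∈ w.reverse, (x == '.') = true :=
    List.dropWhile_eq_nil_iff.mp (by simpa using he)
  rcases hw : w with - | ⟨c, rest⟩
  · exact h2 hw
  · have : (c == '.') = true := hall c (by rw [hw]; simp)
    exact h1 (by rw [hw, List.head?_cons]; simpa using this)

theorem rstrip_prefix (w : List Char) : rstripDots w <+: w := by
  obtain ⟨pre, hp⟩ := List.dropWhile_suffix (l := w.reverse) (· == '.')
  refine ⟨pre.reverse, ?_⟩
  have h2 : rstripDots w ++ pre.reverse =
      (pre ++ List.dropWhile (fun x => x == '.') w.reverse).reverse := by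
    rw [List.reverse_append]; rfl
  rw [h2, hp, List.reverse_reverse]

theorem trim_take_aux : ∀ (n : Nat) (r : List Char), r.length = 15 + n →
    solATrim r = solATrim (r.take 15) := by
  intro n
  induction n with
  | zero => intro r hr; rw [List.take_of_length_le (by omega)]
  | succ n ih =>
    intro r hr
    rw [solATrim, dif_pos (Or.inl (by omega))]
    simp only [PySem.List.slice_to_neg_one]
    rw [ih r.dropLast (by simp [List.length_dropLast]; omega)]
    congr 1
    rw [List.dropLast_eq_take, List.take_take]
    congr 1
    omega

theorem trim_take (r : List Char) (h : 15 ≤ r.length) : solATrim r = solATrim (r.take 15) :=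
  trim_take_aux (r.length - 15) r (by omega)

theorem trim_small_aux : ∀ (n : Nat) (r : List Char), r.length ≤ n → r.length ≤ 15 →
    solATrim r = rstripDots r := by
  intro n
  induction n with
  | zero =>
    intro r hr _
    have : r = [] := by simpa using List.length_eq_zero_iff.mp (by omega)
    subst this
    rw [solATrim, dif_neg (by simp [PySem.List.pyGet?_neg_one])]
    rfl
  | succ n ih =>
    intro r hr h15
    by_cases hd : r.getLast? = some '.'
    · obtain ⟨u, rfl⟩ := List.getLast?_eq_some_iff.mp hd
      rw [solATrim, dif_pos (Or.inr (by rw [PySem.List.pyGet?_neg_one]; exact hd))]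
      simp only [PySem.List.slice_to_neg_one, List.dropLast_concat]
      rw [ih u (by simp at hr; omega) (by simp at h15; omega), rstrip_append_dot]
    · rw [solATrim, dif_neg (by
        rintro (h | h)
        · omega
        · rw [PySem.List.pyGet?_neg_one] at h; exact hd h)]
      exact (rstrip_noop r hd).symm

theorem trim_small (r : List Char) (h : r.length ≤ 15) : solATrim r = rstripDots r :=
  trim_small_aux r.length r le_rfl h

theorem pad_eq_aux : ∀ (n : Nat) (w : List Char) (c : Char), w.getLast? = some c →
    3 - w.length ≤ n → solAPad w = w ++ List.replicate (3 - w.length) c := by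
  intro n
  induction n with
  | zero =>
    intro w c _ hn
    rw [solAPad, dif_neg (by omega)]
    rw [show 3 - w.length = 0 from by omega]
    simp
  | succ n ih =>
    intro w c hlast hn
    by_cases h : w.length < 3
    · obtain ⟨u, rfl⟩ := List.getLast?_eq_some_iff.mp hlast
      rw [solAPad, dif_pos h, PySem.List.pyGetD_neg_one_append_singleton,
        ih (u ++ [c] ++ [c]) c List.getLast?_concat (by simp at hn ⊢; omega)]
      have hlen : 3 - (u ++ [c]).length = (3 - (u ++ [c] ++ [c]).length) + 1 := by
        simp at h ⊢; omega
      rw [hlen, List.replicate_succ]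
      simp
    · rw [solAPad, dif_neg h]
      rw [show 3 - w.length = 0 from by omega]
      simp

theorem pad_eq (w : List Char) (c : Char) (h : w.getLast? = some c) :
    solAPad w = w ++ List.replicate (3 - w.length) c :=
  pad_eq_aux 3 w c h (by omega)

-- the whole tail of both pipelines, starting from the common cleaned string a
theorem tail_eq (a : List Char) (hh : a.head? ≠ some '.') (hn : List.IsChain noddP a) :
    (let answer :=
      if a.length ≠ 0 ∧ PySem.List.pyGet? a (-1) = some '.' then
        PySem.List.slice a none (some (-1))
      else if a.length = 0 then ['a'] else a
     let answer := if 15 < answer.length then solATrim answer else answer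
     if answer.length < 3 then solAPad answer else answer) =
    (let s := if rstripDots a = [] then ['a'] else rstripDots a
     let s := rstripDots (PySem.List.slice s none (some 15))
     s ++ PySem.List.pyRepeat [PySem.List.pyGetD s (-1) 'a'] (3 - (s.length : Int))) := by
  dsimp only
  have hA2 : (if a.length ≠ 0 ∧ PySem.List.pyGet? a (-1) = some '.' then
        PySem.List.slice a none (some (-1))
      else if a.length = 0 then ['a'] else a) =
      (if rstripDots a = [] then ['a'] else rstripDots a) := by
    by_cases hd : a.getLast? = some '.'
    · have hane : a ≠ [] := by intro h; simp [h] at hd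
      rw [if_pos ⟨by simpa [List.length_eq_zero_iff] using hane,
            by rw [PySem.List.pyGet?_neg_one]; exact hd⟩,
        PySem.List.slice_to_neg_one, ← rstrip_eq_dropLast a hn hd,
        if_neg (rstrip_ne_nil a hh hane)]
    · rw [rstrip_noop a hd]
      by_cases hae : a = []
      · subst hae; simp
      · rw [if_neg (by
            rintro ⟨-, h2⟩
            rw [PySem.List.pyGet?_neg_one] at h2
            exact hd h2),
          if_neg (by simpa [List.length_eq_zero_iff] using hae), if_neg hae]
  rw [hA2]
  set r := if rstripDots a = [] then ['a'] else rstripDots a with hr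
  have hrne : r ≠ [] := by
    by_cases h : rstripDots a = [] <;> simp [hr, h]
  have hrhead : r.head? ≠ some '.' := by
    by_cases h : rstripDots a = []
    · simp [hr, h]
    · rw [hr, if_neg h]
      obtain ⟨t0, ht0⟩ := rstrip_prefix a
      rw [← ht0] at hh
      rwa [List.head?_append_of_ne_nil _ h] at hh
  have hrlast : r.getLast? ≠ some '.' := by
    by_cases h : rstripDots a = []
    · simp [hr, h]
    · rw [hr, if_neg h]; exact rstrip_last a
  have htake : PySem.List.slice r none (some 15) = r.take 15 := by
    rw [show ((15 : Int)) = ((15 : Nat) : Int) from rfl, PySem.List.slice_to_natCast]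
  rw [htake]
  have hA3 : (if 15 < r.length then solATrim r else r) = rstripDots (r.take 15) := by
    by_cases h : 15 < r.length
    · rw [if_pos h, trim_take r (le_of_lt h), trim_small _ (by simp)]
    · rw [if_neg h, List.take_of_length_le (by omega), rstrip_noop r hrlast]
  rw [hA3]
  set w := rstripDots (r.take 15) with hw
  have hwne : w ≠ [] := by
    refine rstrip_ne_nil _ ?_ ?_
    · rw [List.head?_take, if_neg (by norm_num)]; exact hrhead
    · rw [Ne, List.take_eq_nil_iff]
      rintro (h | h)
      · norm_num at h
      · exact hrne h
  rcases hwl : w.getLast? with - | c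
  · exact absurd (List.getLast?_eq_none_iff.mp hwl) hwne
  have hA4 : (if w.length < 3 then solAPad w else w) = w ++ List.replicate (3 - w.length) c := by
    by_cases h3 : w.length < 3
    · rw [if_pos h3, pad_eq w c hwl]
    · rw [if_neg h3, show 3 - w.length = 0 from by omega]
      simp
  rw [hA4]
  congr 1
  rw [PySem.List.pyGetD_neg_one _ _ hwne,
    show w.getLast hwne = c from by
      have := List.getLast?_eq_some_getLast (l := w) hwne
      rw [hwl] at this; injection this with h; exact h.symm,
    PySem.List.pyRepeat_singleton]
  congr 1
  omega

theorem pipeline_eq (l : List Char) :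
    (let answer := l.foldl solAstep []
     let answer :=
       if answer.length ≠ 0 ∧ PySem.List.pyGet? answer (-1) = some '.' then
         PySem.List.slice answer none (some (-1))
       else if answer.length = 0 then ['a'] else answer
     let answer := if 15 < answer.length then solATrim answer else answer
     if answer.length < 3 then solAPad answer else answer) =
    (let s := l.filter (fun c => PySem.Chars.isalnum c || decide (c ∈ ['-', '_', '.']))
     let s := ((s.zip ('x' :: s)).filter (fun q => !(decide (q.1 = '.' ∧ q.2 = '.')))).map (·.1)
     let s := PySem.Chars.stripChars s ['.']
     let s := if s = [] then ['a'] else s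
     let s := rstripDots (PySem.List.slice s none (some 15))
     s ++ PySem.List.pyRepeat [PySem.List.pyGetD s (-1) 'a'] (3 - (s.length : Int))) := by
  dsimp only
  rw [show (l.filter (fun c => PySem.Chars.isalnum c || decide (c ∈ ['-', '_', '.']))) =
      l.filter keepC from rfl]
  rw [zip_collapse (l.filter keepC) 'x']
  rw [foldl_step_filter,
    foldl_step_nil (l.filter keepC) (fun c hc => (List.mem_filter.mp hc).2)]
  have hstrip : PySem.Chars.stripChars (zcol 'x' (l.filter keepC)) ['.'] =
      rstripDots (aclean (l.filter keepC)) := by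
    unfold PySem.Chars.stripChars
    have hp : (fun c => (['.'] : List Char).contains c) = (fun c : Char => c == '.') := by
      funext c; by_cases h : c = '.' <;> simp [h]
    show (List.dropWhile _ (List.dropWhile _ _).reverse).reverse = _
    rw [hp]
    rw [show List.dropWhile (fun c : Char => c == '.') (zcol 'x' (l.filter keepC)) =
        aclean (l.filter keepC) from lstrip_zcol (l.filter keepC) 'x']
    rfl
  rw [hstrip]
  exact tail_eq (aclean (l.filter keepC)) (head_aclean _) (nodd_aclean _)

-- ===== VERDICT (by name: the statement is the Claim_ definition above) =====
theorem solution_spec : Claim_equal_solution := by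
  intro new_id _
  show solution new_id = solution_alt new_id
  unfold solution solution_alt
  exact congrArg String.ofList (pipeline_eq (PySem.Chars.lower new_id.toList))
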